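-- pv_equiv track=rewrite | github.com/shauhong/HateNet | backend/HateNet/models/utils.py | cluster_tokens_bert
-- ===== SOURCE A (Python) =====
-- from copy import deepcopy
--
-- def cluster_tokens_bert(tokens, pattern="##"):
--     tokens = deepcopy(tokens)
--     segments = list()
--     i = len(tokens) - 1
--     while len(tokens) > 0:
--         token = tokens.pop()
--         if token.startswith(pattern):
--             segment = list()
--             segment.append(i)
--             while True:
--                 i -= 1
--                 token = tokens.pop()
--                 segment.append(i)
--                 if not token.startswith(pattern):
--                     break
--             segments.append(sorted(segment))
--         else:
--             segments.append([i])
--         i -= 1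
--     segments = sorted(segments, key=lambda x: x[0])
--     return segments
-- ===== SOURCE B (Python) =====
-- def cluster_tokens_bert(tokens, pattern="##"):
--     # Single forward pass: a token starting with `pattern` joins the current
--     # (last) segment, any other token opens a new segment. Indices come out
--     # ascending, so no sorting and no copying is needed.
--     segments = []
--     for i, token in enumerate(tokens):
--         if token.startswith(pattern):
--             segments[-1].append(i)
--         else:
--             segments.append([i])
--     return segments
-- ===== Notes on version B (the rewrite author's own statement) =====
-- stated objective: simpler
-- what changed: Replaced the backward pop-based scan with nested run-consuming loop, deepcopy, per-segment sort and final sort-by-head by a single forward pass that appends each index to the last segment or opens a new one, producing the segments already in order.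
import Mathlib
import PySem

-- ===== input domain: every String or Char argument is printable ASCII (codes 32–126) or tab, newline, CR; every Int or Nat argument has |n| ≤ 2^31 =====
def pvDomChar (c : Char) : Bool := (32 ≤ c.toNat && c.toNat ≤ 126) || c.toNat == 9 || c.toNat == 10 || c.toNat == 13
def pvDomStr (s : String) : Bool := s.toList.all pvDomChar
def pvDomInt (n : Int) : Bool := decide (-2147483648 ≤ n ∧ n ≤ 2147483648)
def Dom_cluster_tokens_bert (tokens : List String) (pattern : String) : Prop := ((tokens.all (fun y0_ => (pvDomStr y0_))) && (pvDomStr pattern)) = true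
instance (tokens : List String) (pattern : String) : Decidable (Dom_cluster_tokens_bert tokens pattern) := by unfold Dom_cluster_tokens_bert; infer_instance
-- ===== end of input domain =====

-- B replaces A's backward pop-based scan (nested run-consuming loop, deepcopy, per-segment
-- sort and a final sort by first index) with a single forward pass that extends the last
-- segment or opens a new one; objective: simpler. A deep-copies its argument first, so
-- neither version mutates the caller's list.

-- ===== PORT A =====
-- Python pops from the END of `tokens`; both loops of the port therefore run on the
-- REVERSED list, where `.pop()` is taking the head.
-- Inner `while True` loop: pop, decrement i, append i to the segment, stop when the popped
-- token does not start with `pattern`. Popping an empty list raises IndexError in Python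
-- (excluded by Pre_); the port returns its current state there.
def pvInnerA (pattern : String) : List String → Int → List Int → (List Int × List String × Int)
  | [], i, seg => (seg, [], i - 1)
  | t :: rest, i, seg =>
      let seg' := seg ++ [i - 1]
      if PySem.Str.startswith t pattern then pvInnerA pattern rest (i - 1) seg'
      else (seg', rest, i - 1)

-- outer `while len(tokens) > 0` loop; fuel = length of the remaining list (each iteration
-- consumes at least one element, so the initial fuel is never exhausted).
def pvOuterA (pattern : String) : Nat → List String → Int → List (List Int) → List (List Int)
  | 0, _, _, segs => segs
  | _ + 1, [], _, segs => segs
  | fuel + 1, t :: rest, i, segs =>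
      if PySem.Str.startswith t pattern then
        let r := pvInnerA pattern rest i [i]
        pvOuterA pattern fuel r.2.1 (r.2.2 - 1) (segs ++ [PySem.List.sorted r.1 (fun x => x) false])
      else
        pvOuterA pattern fuel rest (i - 1) (segs ++ [[i]])

-- final `sorted(segments, key=lambda x: x[0])`: every segment A appends is nonempty, so
-- the key x[0] is headI.
def cluster_tokens_bert (tokens : List String) (pattern : String) : List (List Int) :=
  PySem.List.sorted (pvOuterA pattern tokens.reverse.length tokens.reverse ((tokens.length : Int) - 1) [])
    (fun s => s.headI) false

-- ===== PORT B =====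
-- `segments[-1].append(i)`: on an empty segments list Python raises IndexError (excluded
-- by Pre_); the port leaves [] unchanged there.
def pvAppendLast : List (List Int) → Int → List (List Int)
  | [], _ => []
  | [s], i => [s ++ [i]]
  | s :: r, i => s :: pvAppendLast r i

def cluster_tokens_bert_alt (tokens : List String) (pattern : String) : List (List Int) :=
  (PySem.List.enumerate tokens 0).foldl
    (fun segs p => if PySem.Str.startswith p.2 pattern then pvAppendLast segs p.1 else segs ++ [[p.1]])
    []

-- ===== PRECONDITION & SPEC =====
-- Pre_ excludes exactly the inputs on which BOTH programs raise IndexError: a nonempty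
-- token list whose first token starts with `pattern` (A pops past the start of the list,
-- B indexes segments[-1] while segments is still empty).
def Pre_cluster_tokens_bert (tokens : List String) (pattern : String) : Prop :=
  tokens = [] ∨ PySem.Str.startswith tokens.headI pattern = false

instance (tokens : List String) (pattern : String) : Decidable (Pre_cluster_tokens_bert tokens pattern) := by
  unfold Pre_cluster_tokens_bert; infer_instance

def pvWitness_cluster_tokens_bert : List String × String := (["a", "##b", "##c", "d"], "##")

def Spec_cluster_tokens_bert (tokens : List String) (pattern : String) (out : List (List Int)) : Prop := out = cluster_tokens_bert_alt tokens pattern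
instance (tokens : List String) (pattern : String) (out : List (List Int)) : Decidable (Spec_cluster_tokens_bert tokens pattern out) := by unfold Spec_cluster_tokens_bert; infer_instance

-- ===== CLAIM (what is proved, stated in full; the proofs are below) =====
def Claim_equal_cluster_tokens_bert : Prop := ∀ (tokens : List String) (pattern : String), Dom_cluster_tokens_bert tokens pattern → Pre_cluster_tokens_bert tokens pattern → Spec_cluster_tokens_bert tokens pattern (cluster_tokens_bert tokens pattern)

-- ===== LEMMAS AND PROOFS =====

def pvSpec (pattern : String) (i : Int) : List String → List (List Int)
  | [] => []
  | _ :: ts =>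
      let k := (ts.takeWhile (fun t => PySem.Str.startswith t pattern)).length
      PySem.List.pyRange i (i + 1 + k) 1 ::
        pvSpec pattern (i + 1 + (k : Int)) (ts.dropWhile (fun t => PySem.Str.startswith t pattern))
  termination_by ts => ts.length
  decreasing_by simp only [List.length_cons]; exact Nat.lt_succ_of_le (List.length_dropWhile_le _ _)

lemma pvSpec_cons (pattern : String) (t : String) (ts : List String) (i : Int) :
    pvSpec pattern i (t :: ts)
      = PySem.List.pyRange i (i + 1 + ((ts.takeWhile (fun s => PySem.Str.startswith s pattern)).length : Int)) 1 ::
        pvSpec pattern (i + 1 + ((ts.takeWhile (fun s => PySem.Str.startswith s pattern)).length : Int))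
          (ts.dropWhile (fun s => PySem.Str.startswith s pattern)) := by
  rw [pvSpec]

lemma pvTakeWhile_append (p : String → Bool) (xs : List String) (t : String) (rest : List String)
    (ht : p t = false) :
    (xs ++ t :: rest).takeWhile p = xs.takeWhile p ∧
    (xs ++ t :: rest).dropWhile p = xs.dropWhile p ++ t :: rest := by
  induction xs with
  | nil => simp [List.takeWhile, List.dropWhile, ht]
  | cons a as ih =>
    by_cases hpa : p a = true
    · simp [hpa, ih.1, ih.2]
    · simp at hpa; simp [hpa]

lemma pvSpec_split (pattern : String) (t : String) (w : List String)
    (hw : ∀ x ∈ w, PySem.Str.startswith x pattern = true)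
    (ht : PySem.Str.startswith t pattern = false) :
    ∀ (n : Nat) (u : List String), u.length ≤ n → ∀ (i : Int),
    pvSpec pattern i (u ++ t :: w)
      = pvSpec pattern i u ++ [PySem.List.pyRange (i + u.length) (i + u.length + 1 + w.length) 1] := by
  intro n
  induction n with
  | zero =>
    intro u hu i
    have : u = [] := List.length_eq_zero_iff.mp (Nat.le_zero.mp hu)
    subst this
    rw [List.nil_append, pvSpec, pvSpec]
    simp only [List.takeWhile_eq_self_iff.mpr hw, List.dropWhile_eq_nil_iff.mpr (fun x hx => hw x hx)]
    rw [pvSpec]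
    simp only [List.length_nil, List.nil_append]
    norm_num
  | succ n ih =>
    intro u hu i
    cases u with
    | nil => exact ih [] (Nat.zero_le n) i
    | cons a u' =>
      have hTW := (pvTakeWhile_append (fun s => PySem.Str.startswith s pattern) u' t w ht).1
      have hDW := (pvTakeWhile_append (fun s => PySem.Str.startswith s pattern) u' t w ht).2
      rw [List.cons_append, pvSpec, pvSpec]
      simp only [hTW, hDW]
      rw [ih _ (by
            have := List.length_dropWhile_le (fun s => PySem.Str.startswith s pattern) u'
            simp only [List.length_cons] at hu; omega)]
      rw [List.cons_append, List.cons.injEq]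
      refine ⟨rfl, ?_⟩
      have hlen : ((u'.takeWhile (fun s => PySem.Str.startswith s pattern)).length : Int)
          + ((u'.dropWhile (fun s => PySem.Str.startswith s pattern)).length : Int) = (u'.length : Int) := by
        have h := congrArg List.length
          (List.takeWhile_append_dropWhile (p := fun s => PySem.Str.startswith s pattern) (l := u'))
        rw [List.length_append] at h
        push_cast [← h]; ring
      have h1 : i + 1 + ((u'.takeWhile (fun t => PySem.Str.startswith t pattern)).length : Int)
          + ((u'.dropWhile (fun t => PySem.Str.startswith t pattern)).length : Int)
          = i + ((u'.length : Int) + 1) := by omega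
      rw [List.length_cons]
      push_cast
      rw [h1]

lemma pvSpec_head_ge (pattern : String) : ∀ (n : Nat) (ts : List String), ts.length ≤ n →
    ∀ (i : Int) (g : List Int), g ∈ pvSpec pattern i ts → i ≤ g.headI := by
  intro n
  induction n with
  | zero =>
    intro ts hts i g hg
    have : ts = [] := List.length_eq_zero_iff.mp (Nat.le_zero.mp hts)
    subst this
    simp [pvSpec] at hg
  | succ n ih =>
    intro ts hts i g hg
    cases ts with
    | nil => simp [pvSpec] at hg
    | cons t ts' =>
      rw [pvSpec_cons] at hg
      simp only [List.mem_cons] at hg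
      rcases hg with h | h
      · subst h
        rw [PySem.List.pyRange_one_cons (by omega)]
        simp
      · have hlen : (ts'.dropWhile (fun s => PySem.Str.startswith s pattern)).length ≤ n := by
          have := List.length_dropWhile_le (fun s => PySem.Str.startswith s pattern) ts'
          simp only [List.length_cons] at hts; omega
        have := ih _ hlen _ g h
        omega

lemma pvSpec_pairwise (pattern : String) : ∀ (n : Nat) (ts : List String), ts.length ≤ n →
    ∀ (i : Int), (pvSpec pattern i ts).Pairwise (fun a b => a.headI < b.headI) := by
  intro n
  induction n with
  | zero =>
    intro ts hts i
    have : ts = [] := List.length_eq_zero_iff.mp (Nat.le_zero.mp hts)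
    subst this
    simp [pvSpec]
  | succ n ih =>
    intro ts hts i
    cases ts with
    | nil => simp [pvSpec]
    | cons t ts' =>
      rw [pvSpec_cons]
      have hlen : (ts'.dropWhile (fun s => PySem.Str.startswith s pattern)).length ≤ n := by
        have := List.length_dropWhile_le (fun s => PySem.Str.startswith s pattern) ts'
        simp only [List.length_cons] at hts; omega
      refine List.Pairwise.cons ?_ (ih _ hlen _)
      intro g hg
      have h1 := pvSpec_head_ge pattern n _ hlen _ g hg
      rw [PySem.List.pyRange_one_cons (by omega)]
      simp only [List.headI_cons]
      omega

lemma pvAppendLast_append (xs : List (List Int)) (y : List Int) (i : Int) :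
    pvAppendLast (xs ++ [y]) i = xs ++ [y ++ [i]] := by
  induction xs with
  | nil => rfl
  | cons a as ih =>
    cases as with
    | nil => rfl
    | cons b bs => simpa [pvAppendLast] using ih

lemma pvFoldB (pattern : String) : ∀ (ts : List String) (i : Int) (done : List (List Int)) (cur : List Int),
    (PySem.List.enumerate ts i).foldl
      (fun segs p => if PySem.Str.startswith p.2 pattern then pvAppendLast segs p.1 else segs ++ [[p.1]])
      (done ++ [cur])
    = done ++ [cur ++ PySem.List.pyRange i (i + ((ts.takeWhile (fun t => PySem.Str.startswith t pattern)).length : Int)) 1]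
        ++ pvSpec pattern (i + ((ts.takeWhile (fun t => PySem.Str.startswith t pattern)).length : Int))
            (ts.dropWhile (fun t => PySem.Str.startswith t pattern)) := by
  intro ts
  induction ts with
  | nil =>
    intro i done cur
    simp [PySem.List.enumerate_nil, pvSpec, PySem.List.pyRange_one_eq_nil le_rfl]
  | cons t ts ih =>
    intro i done cur
    rw [PySem.List.enumerate_cons, List.foldl_cons]
    by_cases hsw : PySem.Str.startswith t pattern = true
    · rw [if_pos hsw, pvAppendLast_append, ih (i + 1) done (cur ++ [i])]
      simp only [List.takeWhile_cons, List.dropWhile_cons, hsw, if_true]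
      have hK : (((t :: ts.takeWhile (fun s => PySem.Str.startswith s pattern)).length : Int))
          = ((ts.takeWhile (fun s => PySem.Str.startswith s pattern)).length : Int) + 1 := by
        simp [List.length_cons]
      have harg : i + ((t :: ts.takeWhile (fun s => PySem.Str.startswith s pattern)).length : Int)
          = i + 1 + ((ts.takeWhile (fun s => PySem.Str.startswith s pattern)).length : Int) := by
        rw [hK]; ring
      rw [harg, List.append_assoc cur [i]]
      conv_rhs => rw [PySem.List.pyRange_one_cons (show i < i + 1 + ((ts.takeWhile (fun s => PySem.Str.startswith s pattern)).length : Int) by omega)]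
      rfl
    · simp only [Bool.not_eq_true] at hsw
      rw [if_neg (by rw [hsw]; exact Bool.false_ne_true)]
      rw [ih (i + 1) (done ++ [cur]) [i]]
      simp only [List.takeWhile_cons, List.dropWhile_cons, hsw, if_false, Bool.false_eq_true]
      rw [pvSpec_cons]
      simp only [List.length_nil, Nat.cast_zero, add_zero, PySem.List.pyRange_one_eq_nil le_rfl,
        List.append_nil]
      conv_rhs => rw [PySem.List.pyRange_one_cons (show i < i + 1 + ((ts.takeWhile (fun s => PySem.Str.startswith s pattern)).length : Int) by omega)]
      simp only [List.append_assoc, List.cons_append, List.nil_append]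

lemma pvAlt_eq_spec (tokens : List String) (pattern : String)
    (h : tokens = [] ∨ PySem.Str.startswith tokens.headI pattern = false) :
    cluster_tokens_bert_alt tokens pattern = pvSpec pattern 0 tokens := by
  cases tokens with
  | nil => simp [cluster_tokens_bert_alt, PySem.List.enumerate_nil, pvSpec]
  | cons t ts =>
    have ht : PySem.Str.startswith t pattern = false := by
      rcases h with h | h
      · exact absurd h (by simp)
      · simpa using h
    unfold cluster_tokens_bert_alt
    rw [PySem.List.enumerate_cons, List.foldl_cons, if_neg (by rw [ht]; exact Bool.false_ne_true)]
    rw [show ([] : List (List Int)) ++ [[(0 : Int)]] = [] ++ [[0]] from rfl,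
      pvFoldB pattern ts (0 + 1) [] [0], pvSpec_cons]
    conv_rhs => rw [PySem.List.pyRange_one_cons (show (0 : Int) < 0 + 1 + ((ts.takeWhile (fun s => PySem.Str.startswith s pattern)).length : Int) by omega)]
    simp only [List.nil_append, List.cons_append, zero_add]

lemma pvDesc_reverse : ∀ (n : Nat) (a : Int),
    ((List.range n).map (fun (k : Nat) => a - (k : Int))).reverse
      = (List.range n).map (fun (k : Nat) => a - (n : Int) + 1 + (k : Int)) := by
  intro n
  induction n with
  | zero => intro a; simp
  | succ m ih =>
    intro a
    conv_lhs => rw [List.range_succ]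
    conv_rhs => rw [List.range_succ_eq_map]
    rw [List.map_append, List.reverse_append, ih a]
    simp only [List.map_cons, List.map_nil, List.reverse_cons, List.reverse_nil,
      List.nil_append, List.singleton_append, List.map_map]
    congr 1
    · push_cast; ring
    · apply List.map_congr_left; intro k _; simp only [Function.comp_apply]; push_cast; ring

lemma pvSorted_desc (m : Nat) (i : Int) :
    PySem.List.sorted ((i :: (List.range (m + 1)).map (fun (k : Nat) => i - 1 - (k : Int)))) (fun x => x) false
      = PySem.List.pyRange (i - 1 - (m : Int)) (i + 1) 1 := by
  have hxs : (i :: (List.range (m + 1)).map (fun (k : Nat) => i - 1 - (k : Int)))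
      = (List.range (m + 2)).map (fun (k : Nat) => i - (k : Int)) := by
    conv_rhs => rw [List.range_succ_eq_map]
    rw [List.map_cons, List.map_map]
    congr 1
    · simp
    · apply List.map_congr_left; intro k _; simp only [Function.comp_apply]; push_cast; ring
  have hys : PySem.List.pyRange (i - 1 - (m : Int)) (i + 1) 1
      = ((List.range (m + 2)).map (fun (k : Nat) => i - (k : Int))).reverse := by
    rw [pvDesc_reverse, PySem.List.pyRange_one]
    have : (i + 1 - (i - 1 - (m : Int))).toNat = m + 2 := by omega
    rw [this]
    apply List.map_congr_left; intro k _; push_cast; ring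
  rw [hxs, hys]
  apply PySem.List.sorted_eq_of_perm_of_pairwise_lt
  · exact List.reverse_perm _
  · rw [← hys]
    exact PySem.List.pairwise_lt_pyRange_one _ _

lemma pvInnerA_spec (pattern : String) : ∀ (w : List String) (t : String) (rest : List String) (i : Int) (seg : List Int),
    (∀ x ∈ w, PySem.Str.startswith x pattern = true) → PySem.Str.startswith t pattern = false →
    pvInnerA pattern (w ++ t :: rest) i seg
      = (seg ++ (List.range (w.length + 1)).map (fun (k : Nat) => i - 1 - (k : Int)), rest, i - 1 - (w.length : Int)) := by
  intro w
  induction w with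
  | nil =>
    intro t rest i seg _ ht
    show pvInnerA pattern (t :: rest) i seg = _
    rw [pvInnerA, if_neg (by rw [ht]; exact Bool.false_ne_true)]
    simp
  | cons a w' ih =>
    intro t rest i seg hw ht
    have ha : PySem.Str.startswith a pattern = true := hw a (List.mem_cons_self)
    have hw' : ∀ x ∈ w', PySem.Str.startswith x pattern = true :=
      fun x hx => hw x (List.mem_cons_of_mem a hx)
    have hmap : ([i - 1] ++ (List.range (w'.length + 1)).map (fun (k : Nat) => i - 1 - 1 - (k : Int)))
        = (List.range (w'.length + 1 + 1)).map (fun (k : Nat) => i - 1 - (k : Int)) := by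
      conv_rhs => rw [List.range_succ_eq_map]
      rw [List.map_cons, List.map_map, List.singleton_append, List.cons.injEq]
      refine ⟨by push_cast; ring, List.map_congr_left fun k _ => by
        simp only [Function.comp_apply]; push_cast; ring⟩
    show pvInnerA pattern (a :: (w' ++ t :: rest)) i seg = _
    rw [pvInnerA, if_pos ha, ih t rest (i - 1) _ hw' ht, List.append_assoc, hmap]
    simp only [List.length_cons, Prod.mk.injEq]
    refine ⟨trivial, trivial, ?_⟩; push_cast; ring

lemma pvDropWhile_head_false {p : String → Bool} : ∀ (l : List String) (a : String) (l' : List String),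
    l.dropWhile p = a :: l' → p a = false := by
  intro l
  induction l with
  | nil => intro a l' h; simp at h
  | cons x xs ih =>
    intro a l' h
    rw [List.dropWhile_cons] at h
    by_cases hx : p x = true
    · rw [if_pos hx] at h; exact ih a l' h
    · simp only [Bool.not_eq_true] at hx
      rw [if_neg (by simp [hx])] at h
      injection h with h1 _
      rw [h1] at hx
      exact hx

lemma pvOuterA_spec (pattern : String) : ∀ (n : Nat) (ts : List String), ts.length ≤ n →
    ∀ (fuel : Nat), ts.length ≤ fuel →
    (ts = [] ∨ PySem.Str.startswith ts.headI pattern = false) → ∀ (segs : List (List Int)),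
    pvOuterA pattern fuel ts.reverse ((ts.length : Int) - 1) segs
      = segs ++ (pvSpec pattern 0 ts).reverse := by
  intro n
  induction n with
  | zero =>
    intro ts hts fuel _ _ segs
    have : ts = [] := List.length_eq_zero_iff.mp (Nat.le_zero.mp hts)
    subst this
    cases fuel <;> simp [pvOuterA, pvSpec]
  | succ n ih =>
    intro ts hts fuel hfuel hhead segs
    rcases hts0 : ts with _ | ⟨t0, ts0⟩
    · subst hts0; cases fuel <;> simp [pvOuterA, pvSpec]
    subst hts0
    -- decompose the reversed list at its leading run of pattern-continuations
    have hrest : (t0 :: ts0).reverse.dropWhile (fun s => PySem.Str.startswith s pattern) ≠ [] := by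
      intro hnil
      have hall := List.dropWhile_eq_nil_iff.mp hnil
      have ht0 : t0 ∈ (t0 :: ts0).reverse := by simp
      have := hall t0 ht0
      rcases hhead with h | h
      · exact absurd h (by simp)
      · simp only [List.headI_cons] at h
        rw [h] at this
        exact Bool.false_ne_true this
    rcases hdw : (t0 :: ts0).reverse.dropWhile (fun s => PySem.Str.startswith s pattern) with _ | ⟨t, ur⟩
    · exact absurd hdw hrest
    have hPt : PySem.Str.startswith t pattern = false :=
      pvDropWhile_head_false (t0 :: ts0).reverse t ur hdw
    set wrev := (t0 :: ts0).reverse.takeWhile (fun s => PySem.Str.startswith s pattern) with hwrev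
    have hsplitRev : (t0 :: ts0).reverse = wrev ++ t :: ur := by
      rw [hwrev, ← hdw, List.takeWhile_append_dropWhile]
    have hw : ∀ x ∈ wrev, PySem.Str.startswith x pattern = true :=
      fun x hx => List.mem_takeWhile_imp (p := fun s => PySem.Str.startswith s pattern) hx
    have hts_eq : (t0 :: ts0) = ur.reverse ++ t :: wrev.reverse := by
      have := congrArg List.reverse hsplitRev
      simpa [List.reverse_append] using this
    have hwR : ∀ x ∈ wrev.reverse, PySem.Str.startswith x pattern = true :=
      fun x hx => hw x (List.mem_reverse.mp hx)
    have hheadU : ur.reverse = [] ∨ PySem.Str.startswith ur.reverse.headI pattern = false := by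
      rcases hu : ur.reverse with _ | ⟨u0, us⟩
      · exact Or.inl rfl
      · right
        have : t0 = u0 := by rw [hu] at hts_eq; simpa using congrArg List.headI hts_eq
        rcases hhead with h | h
        · exact absurd h (by simp)
        · simp only [List.headI_cons] at h
          simp only [List.headI_cons]
          rw [← this]; exact h
    have hlen : (t0 :: ts0).length = ur.reverse.length + 1 + wrev.reverse.length := by
      rw [hts_eq]; simp [List.length_append]; omega
    rcases hwcase : wrev with _ | ⟨a, wrev'⟩
    · -- the popped token does not start with `pattern`: single-element segment
      have hrv : (t0 :: ts0).reverse = t :: ur := by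
        rw [hsplitRev, hwcase, List.nil_append]
      have hlen1 : (t0 :: ts0).length = ur.length + 1 := by
        rw [hwcase] at hlen; simpa using hlen
      cases fuel with
      | zero => rw [hlen1] at hfuel; exact absurd hfuel (by omega)
      | succ f =>
        rw [hrv, pvOuterA, if_neg (by rw [hPt]; exact Bool.false_ne_true)]
        have hi1 : ((t0 :: ts0).length : Int) - 1 - 1 = ((ur.reverse.length : Int)) - 1 := by
          rw [hlen1]; push_cast; simp
        rw [show ur = ur.reverse.reverse from (List.reverse_reverse ur).symm, hi1,
          ih ur.reverse (by simp only [List.length_reverse]; rw [hlen1] at hts; omega) f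
            (by simp only [List.length_reverse]; rw [hlen1] at hfuel; omega) hheadU]
        have hsplit := pvSpec_split pattern t [] (by simp) hPt ur.reverse.length ur.reverse le_rfl 0
        rw [show (t0 :: ts0 : List String) = ur.reverse ++ t :: [] from by rw [hts_eq, hwcase]; rfl, hsplit]
        rw [show (0 : Int) + (ur.reverse.length : Int) + 1 + (([] : List String).length : Int)
            = (0 + (ur.reverse.length : Int)) + 1 from by simp, PySem.List.pyRange_one_singleton]
        simp [List.reverse_append, List.length_append]
    · -- the popped token continues a segment: inner while-loop consumes the run
      have ha' : PySem.Str.startswith a pattern = true := by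
        apply hw; rw [hwcase]; exact List.mem_cons_self
      have hw' : ∀ x ∈ wrev', PySem.Str.startswith x pattern = true := by
        intro x hx; apply hw; rw [hwcase]; exact List.mem_cons_of_mem a hx
      have hrv : (t0 :: ts0).reverse = a :: (wrev' ++ t :: ur) := by
        rw [hsplitRev, hwcase, List.cons_append]
      have hlen2 : (t0 :: ts0).length = ur.length + 1 + (wrev'.length + 1) := by
        rw [hwcase] at hlen; simpa using hlen
      cases fuel with
      | zero => rw [hlen2] at hfuel; exact absurd hfuel (by omega)
      | succ f =>
        rw [hrv, pvOuterA, if_pos ha']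
        rw [pvInnerA_spec pattern wrev' t ur _ _ hw' hPt]
        simp only [List.singleton_append]
        rw [pvSorted_desc wrev'.length (((t0 :: ts0).length : Int) - 1)]
        have hi2 : ((t0 :: ts0).length : Int) - 1 - 1 - (wrev'.length : Int) - 1
            = ((ur.reverse.length : Int)) - 1 := by
          rw [hlen2]; push_cast [List.length_reverse]; ring
        rw [show ur = ur.reverse.reverse from (List.reverse_reverse ur).symm, hi2,
          ih ur.reverse (by simp only [List.length_reverse]; rw [hlen2] at hts; omega) f
            (by simp only [List.length_reverse]; rw [hlen2] at hfuel; omega) hheadU]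
        have hsplit := pvSpec_split pattern t wrev.reverse hwR hPt ur.reverse.length ur.reverse le_rfl 0
        have harg1 : ((t0 :: ts0).length : Int) - 1 - 1 - (wrev'.length : Int)
            = 0 + (ur.reverse.length : Int) := by
          rw [hlen2]; push_cast [List.length_reverse]; ring
        have harg2 : ((t0 :: ts0).length : Int) - 1 + 1
            = 0 + (ur.reverse.length : Int) + 1 + (wrev.reverse.length : Int) := by
          rw [hlen2, hwcase]; push_cast [List.length_reverse, List.length_cons]; ring
        rw [harg1, harg2,
          show (t0 :: ts0 : List String) = ur.reverse ++ t :: wrev.reverse from hts_eq, hsplit]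
        simp [List.reverse_append]

-- ===== VERDICT (by name: the statement is the Claim_ definition above) =====
theorem cluster_tokens_bert_spec : Claim_equal_cluster_tokens_bert := by
  intro tokens pattern _ hpre
  unfold Pre_cluster_tokens_bert at hpre
  unfold Spec_cluster_tokens_bert
  have hA : cluster_tokens_bert tokens pattern = pvSpec pattern 0 tokens := by
    unfold cluster_tokens_bert
    rw [List.length_reverse,
      pvOuterA_spec pattern tokens.length tokens le_rfl tokens.length le_rfl hpre [],
      List.nil_append]
    exact PySem.List.sorted_eq_of_perm_of_pairwise_lt _ _ _ (List.reverse_perm _).symm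
      (pvSpec_pairwise pattern tokens.length tokens le_rfl 0)
  rw [hA, pvAlt_eq_spec tokens pattern hpre]
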